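-- pv_equiv track=rewrite | github.com/tsuru7/algorithm-study | typical90/84/B.py | solve
-- ===== SOURCE A (Python) =====
-- def solve(n,s):
--     comp = []
--     pre = s[0]
--     count = 1
--     for i in range(1, n):
--         now = s[i]
--         if now == pre:
--             count += 1
--         else:
--             comp.append((pre, count))
--             count = 1
--         pre = now
--     if count > 1:
--         comp.append((pre, count))
--     tmp = 0
--     for _, count in comp:
--         tmp += count*(count-1)//2
--     ans = n*(n-1)//2 - tmp
--     return ans
-- ===== SOURCE B (Python) =====
-- def solve(n, s):
--     # One pass, no run list and no second loop: start from the pair total and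
--     # subtract, at each position, its same-run predecessors (rl - 1).
--     pre = s[0]
--     rl = 1
--     ans = n * (n - 1) // 2
--     for i in range(1, n):
--         now = s[i]
--         if now == pre:
--             rl += 1
--         else:
--             rl = 1
--         pre = now
--         ans -= rl - 1
--     return ans
-- ===== Notes on version B (the rewrite author's own statement) =====
-- stated objective: simpler
-- what changed: Instead of building a list of (char, runlength) runs and then a second loop computing C(n,2) minus the sum of per-run C(len,2), B keeps a single running answer: it starts from the pair total n*(n-1)//2 and subtracts, at each position, the number rl-1 of same-run predecessors, so the run list and the second pass disappear.
import Mathlib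
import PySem

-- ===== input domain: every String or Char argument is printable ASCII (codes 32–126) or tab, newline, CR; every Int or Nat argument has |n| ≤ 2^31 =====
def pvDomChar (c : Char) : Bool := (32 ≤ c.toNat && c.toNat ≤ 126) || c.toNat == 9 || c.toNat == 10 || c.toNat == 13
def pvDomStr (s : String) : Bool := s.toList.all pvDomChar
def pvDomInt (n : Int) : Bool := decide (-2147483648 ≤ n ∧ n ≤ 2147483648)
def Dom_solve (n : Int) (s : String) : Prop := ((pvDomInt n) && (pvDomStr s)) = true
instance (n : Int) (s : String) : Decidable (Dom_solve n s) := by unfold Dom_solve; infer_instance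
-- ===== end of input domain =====

-- B replaces A's run list and second loop (C(n,2) minus per-run C(len,2)) by one pass
-- that subtracts each position's same-run predecessors from the pair total; objective: simpler.

-- ===== PORT A =====
-- one loop iteration of A: update (comp, pre, count) at index i
def stepA (cs : List Char) (st : List (Char × Int) × Char × Int) (i : Int) :
    List (Char × Int) × Char × Int :=
  let now := PySem.List.pyGetD cs i ' '   -- s[i]; in range under Pre_solve
  if now = st.2.1 then (st.1, now, st.2.2 + 1)
  else (st.1 ++ [(st.2.1, st.2.2)], now, 1)

def solve (n : Int) (s : String) : Int :=
  let cs := s.toList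
  let pre := PySem.List.pyGetD cs 0 ' '   -- s[0]; in range under Pre_solve
  let st := (PySem.List.pyRange 1 n 1).foldl (stepA cs) ([], pre, 1)
  let comp := if st.2.2 > 1 then st.1 ++ [(st.2.1, st.2.2)] else st.1
  let tmp := comp.foldl (fun t pc => t + PySem.Int.floordiv (pc.2 * (pc.2 - 1)) 2) 0
  PySem.Int.floordiv (n * (n - 1)) 2 - tmp

-- ===== PORT B =====
-- one loop iteration of B: update (pre, rl, ans) at index i
def stepB (cs : List Char) (st : Char × Int × Int) (i : Int) : Char × Int × Int :=
  let now := PySem.List.pyGetD cs i ' '   -- s[i]; in range under Pre_solve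
  let rl := if now = st.1 then st.2.1 + 1 else 1
  (now, rl, st.2.2 - (rl - 1))

def solve_alt (n : Int) (s : String) : Int :=
  let cs := s.toList
  let st := (PySem.List.pyRange 1 n 1).foldl (stepB cs)
      (PySem.List.pyGetD cs 0 ' ', 1, PySem.Int.floordiv (n * (n - 1)) 2)
  st.2.2

-- ===== PRECONDITION & SPEC =====
-- Pre_ excludes exactly the inputs where A raises IndexError: empty s (the s[0] read)
-- and n > len(s) (the s[i] reads in the loop).
def Pre_solve (n : Int) (s : String) : Prop :=
  s.toList ≠ [] ∧ n ≤ (s.toList.length : Int)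
instance (n : Int) (s : String) : Decidable (Pre_solve n s) := by unfold Pre_solve; infer_instance

def pvWitness_solve : Int × String := (3, "aab")

def Spec_solve (n : Int) (s : String) (out : Int) : Prop := out = solve_alt n s
instance (n : Int) (s : String) (out : Int) : Decidable (Spec_solve n s out) := by unfold Spec_solve; infer_instance

-- ===== CLAIM (what is proved, stated in full; the proofs are below) =====
def Claim_equal_solve : Prop := ∀ (n : Int) (s : String), Dom_solve n s → Pre_solve n s → Spec_solve n s (solve n s)

-- ===== LEMMAS AND PROOFS =====

-- pairs within a run of length c
def pvC (c : Int) : Int := PySem.Int.floordiv (c * (c - 1)) 2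

lemma pvC_one : pvC 1 = 0 := by decide

lemma pvC_succ (c : Int) : pvC (c + 1) = pvC c + c := by
  unfold pvC
  rw [PySem.Int.floordiv_eq_ediv_of_pos (by norm_num), PySem.Int.floordiv_eq_ediv_of_pos (by norm_num)]
  have h : (c + 1) * (c + 1 - 1) = c * (c - 1) + 2 * c := by ring
  rw [h]
  generalize c * (c - 1) = p
  omega

-- A's final tmp, computed from a run list
def pvTmp (l : List (Char × Int)) : Int :=
  l.foldl (fun t pc => t + PySem.Int.floordiv (pc.2 * (pc.2 - 1)) 2) 0

lemma pvTmp_eq (l : List (Char × Int)) : pvTmp l = (l.map (fun pc => pvC pc.2)).sum := by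
  unfold pvTmp pvC
  rw [PySem.List.foldl_add l (fun pc => PySem.Int.floordiv (pc.2 * (pc.2 - 1)) 2) 0]
  ring

lemma pvTmp_append (l : List (Char × Int)) (p : Char × Int) :
    pvTmp (l ++ [p]) = pvTmp l + pvC p.2 := by
  simp [pvTmp_eq]

-- A's post-loop finalisation of the run list
def pvFin (st : List (Char × Int) × Char × Int) : List (Char × Int) :=
  if st.2.2 > 1 then st.1 ++ [(st.2.1, st.2.2)] else st.1

lemma pvTmp_fin (comp : List (Char × Int)) (pre : Char) (count : Int) (hc : 1 ≤ count) :
    pvTmp (pvFin (comp, pre, count)) = pvTmp comp + pvC count := by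
  unfold pvFin
  by_cases h : count > 1
  · simp [h, pvTmp_append]
  · have : count = 1 := by omega
    simp [this, pvC_one]

-- loop invariant: B's running answer plus A's eventual tmp stays constant up to the
-- pairs A has already committed to its run list and the current partial run
lemma pvLoop (cs : List Char) (n : Int) (k : Nat) :
    ∀ (a : Int) (comp : List (Char × Int)) (pre : Char) (count ans : Int),
    n - a = k → 1 ≤ count →
    ((PySem.List.pyRange a n 1).foldl (stepB cs) (pre, count, ans)).2.2
      + pvTmp (pvFin ((PySem.List.pyRange a n 1).foldl (stepA cs) (comp, pre, count)))
    = ans + pvTmp comp + pvC count := by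
  induction k with
  | zero =>
    intro a comp pre count ans hk hc
    rw [PySem.List.pyRange_one_eq_nil (by omega)]
    simp [pvTmp_fin comp pre count hc]
    ring
  | succ m ih =>
    intro a comp pre count ans hk hc
    rw [PySem.List.pyRange_one_cons (by omega)]
    simp only [List.foldl_cons]
    by_cases h : PySem.List.pyGetD cs a ' ' = pre
    · have hA : stepA cs (comp, pre, count) a = (comp, pre, count + 1) := by
        simp [stepA, h]
      have hB : stepB cs (pre, count, ans) a = (pre, count + 1, ans - count) := by
        simp [stepB, h]; try ring
      rw [hA, hB, ih (a + 1) comp pre (count + 1) (ans - count) (by omega) (by omega)]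
      rw [pvC_succ]
      try ring
    · have hA : stepA cs (comp, pre, count) a = (comp ++ [(pre, count)], PySem.List.pyGetD cs a ' ', 1) := by
        simp [stepA, h]
      have hB : stepB cs (pre, count, ans) a = (PySem.List.pyGetD cs a ' ', 1, ans) := by
        simp [stepB, h]
      rw [hA, hB, ih (a + 1) (comp ++ [(pre, count)]) _ 1 ans (by omega) (by omega)]
      rw [pvTmp_append, pvC_one]
      try ring

-- ===== VERDICT (by name: the statement is the Claim_ definition above) =====
theorem solve_spec : Claim_equal_solve := by
  intro n s _ _
  unfold Spec_solve solve solve_alt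
  by_cases h1 : 1 ≤ n
  · have h' := pvLoop s.toList n (n - 1).toNat 1 [] (PySem.List.pyGetD s.toList 0 ' ') 1
      (PySem.Int.floordiv (n * (n - 1)) 2) (by omega) (by omega)
    simp only [pvTmp, pvFin, pvC_one, List.foldl_nil, add_zero] at h'
    linarith [h']
  · rw [PySem.List.pyRange_one_eq_nil (by omega)]
    simp
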